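-- pv_equiv track=rewrite | github.com/yeongyeongGong/ssafy | algorithm/2.13/delete_letter.py | delete_letter
-- ===== SOURCE A (Python) =====
-- def delete_letter(arr):
--     n = len(arr)
--
--     if n == 0:
--         return 0  # 남은 문자열이 없으면 0을 출력
--
--     lst = []
--     for i in arr:
--         # lst 비어있지 않고, lst 마지막인덱스가
--         # i와 똑같은 문자이면 lst[-1]요소 제거
--         if lst and lst[-1] == i:
--             lst.pop()
--         else: # lst 비어있거나, 마지막인덱스가 i와 같지않으면
--             lst.append(i) # lst i 추가
--
--     return len(lst)
-- ===== SOURCE B (Python) =====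
-- def delete_letter(arr):
--     seq = list(arr)
--     while True:
--         removed = False
--         for i in range(len(seq) - 1):
--             if seq[i] == seq[i + 1]:
--                 del seq[i:i + 2]
--                 removed = True
--                 break
--         if not removed:
--             return len(seq)
-- ===== Notes on version B (the rewrite author's own statement) =====
-- stated objective: alternative
-- what changed: Replaced the one-pass stack with repeated full scans that delete the first adjacent equal pair until none remains (cancellation xx->eps is confluent, so the final length is the same).
import Mathlib
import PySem

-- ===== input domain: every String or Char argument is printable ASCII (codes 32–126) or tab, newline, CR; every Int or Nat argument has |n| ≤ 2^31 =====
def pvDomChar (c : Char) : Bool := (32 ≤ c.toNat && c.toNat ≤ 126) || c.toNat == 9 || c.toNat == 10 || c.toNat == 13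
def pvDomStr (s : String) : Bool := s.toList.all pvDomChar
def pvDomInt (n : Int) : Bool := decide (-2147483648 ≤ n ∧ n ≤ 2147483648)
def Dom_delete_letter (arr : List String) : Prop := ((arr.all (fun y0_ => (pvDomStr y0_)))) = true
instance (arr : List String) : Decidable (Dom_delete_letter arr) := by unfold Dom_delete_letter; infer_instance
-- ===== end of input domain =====

-- B replaces A's one-pass stack by repeated scans deleting the first adjacent equal
-- pair until none remains (alternative decomposition; same final length by confluence).

-- ===== PORT A =====
-- step of A's loop body: 'if lst and lst[-1] == i: lst.pop() else: lst.append(i)'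
def pvStepA (lst : List String) (i : String) : List String :=
  if lst.getLast? = some i then lst.dropLast else lst ++ [i]

def delete_letter (arr : List String) : Int :=
  if arr.length = 0 then 0
  else ((arr.foldl pvStepA []).length : Int)

-- ===== PORT B =====
-- one scan of Source B's for-loop: find the first i with seq[i] == seq[i+1] and delete both
def pvRemovePair : List String → Option (List String)
  | a :: b :: rest => if a = b then some rest else (pvRemovePair (b :: rest)).map (a :: ·)
  | _ => none

theorem pvRemovePair_length : ∀ (xs ys : List String), pvRemovePair xs = some ys → ys.length < xs.length := by
  intro xs
  induction xs with
  | nil => intro ys h; simp [pvRemovePair] at h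
  | cons a t ih =>
    intro ys h
    match t, h with
    | [], h => simp [pvRemovePair] at h
    | b :: rest, h =>
      by_cases hab : a = b
      · simp [pvRemovePair, hab] at h; subst h; simp
      · simp [pvRemovePair, hab] at h
        obtain ⟨zs, hz, rfl⟩ := h
        have := ih zs hz
        simpa using Nat.succ_lt_succ this

-- Source B's while loop: repeat scans until no adjacent equal pair remains
def pvReduceB (xs : List String) : List String :=
  match h : pvRemovePair xs with
  | some ys => pvReduceB ys
  | none => xs
termination_by xs.length
decreasing_by exact pvRemovePair_length _ _ h

def delete_letter_alt (arr : List String) : Int :=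
  ((pvReduceB arr).length : Int)

-- ===== PRECONDITION & SPEC =====
def Spec_delete_letter (arr : List String) (out : Int) : Prop := out = delete_letter_alt arr
instance (arr : List String) (out : Int) : Decidable (Spec_delete_letter arr out) := by unfold Spec_delete_letter; infer_instance

-- ===== CLAIM (what is proved, stated in full; the proofs are below) =====
def Claim_equal_delete_letter : Prop := ∀ (arr : List String), Dom_delete_letter arr → Spec_delete_letter arr (delete_letter arr)

-- ===== LEMMAS AND PROOFS =====

-- 'no adjacent equal elements'
def pvNoAdj : List String → Prop
  | [] => True
  | [_] => True
  | a :: b :: r => a ≠ b ∧ pvNoAdj (b :: r)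

theorem pvNoAdj_tail : ∀ (a : String) (t : List String), pvNoAdj (a :: t) → pvNoAdj t := by
  intro a t h
  match t with
  | [] => trivial
  | b :: r => exact h.2

theorem pvNoAdj_last_ne : ∀ (t : List String) (x : String) (r : List String),
    pvNoAdj (t ++ x :: r) → t.getLast? ≠ some x := by
  intro t
  induction t with
  | nil => intro x r _ h; simp at h
  | cons a s ih =>
    intro x r h
    match s with
    | [] =>
      simp only [List.nil_append, List.cons_append] at h
      simp [List.getLast?]
      exact h.1
    | b :: u =>
      have h2 : pvNoAdj ((b :: u) ++ x :: r) := pvNoAdj_tail a _ h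
      have := ih x r h2
      simpa [List.getLast?_cons_cons] using this

theorem pvNoAdj_append_left : ∀ (t : List String) (x : String), pvNoAdj (t ++ [x]) → pvNoAdj t := by
  intro t
  induction t with
  | nil => intro x _; trivial
  | cons a s ih =>
    intro x h
    match s with
    | [] => trivial
    | b :: u =>
      refine ⟨h.1, ih x ?_⟩
      exact pvNoAdj_tail a _ h

theorem pvNoAdj_push : ∀ (t : List String) (x : String),
    pvNoAdj t → t.getLast? ≠ some x → pvNoAdj (t ++ [x]) := by
  intro t
  induction t with
  | nil => intro x _ _; trivial
  | cons a s ih =>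
    intro x h hl
    match s with
    | [] =>
      simp [List.getLast?] at hl
      exact ⟨hl, trivial⟩
    | b :: u =>
      refine ⟨h.1, ih x h.2 ?_⟩
      simpa [List.getLast?_cons_cons] using hl

theorem pvStepA_noAdj (s : List String) (x : String) (h : pvNoAdj s) : pvNoAdj (pvStepA s x) := by
  unfold pvStepA
  split_ifs with hg
  · -- pop case: s = dropLast ++ [last]
    match s, hg with
    | [], hg => simp at hg
    | a :: t, hg =>
      have hs : (a :: t).dropLast ++ [x] = a :: t := by
        have := List.dropLast_append_getLast? (l := a :: t) (a := x) hg
        simpa using this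
      have : pvNoAdj ((a :: t).dropLast ++ [x]) := by rw [hs]; exact h
      exact pvNoAdj_append_left _ _ this
  · exact pvNoAdj_push s x h hg

-- cancelling one adjacent pair on top of an irreducible stack is the identity
theorem pvStepA_double (s : List String) (x : String) (h : pvNoAdj s) :
    pvStepA (pvStepA s x) x = s := by
  by_cases hg : s.getLast? = some x
  · match s, hg with
    | [], hg => simp at hg
    | a :: t, hg =>
      have hs : (a :: t).dropLast ++ [x] = a :: t := by
        have := List.dropLast_append_getLast? (l := a :: t) (a := x) hg
        simpa using this
      have hne : (a :: t).dropLast.getLast? ≠ some x := by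
        apply pvNoAdj_last_ne _ x []
        rw [show (a :: t).dropLast ++ x :: [] = (a :: t).dropLast ++ [x] from rfl, hs]
        exact h
      have h1 : pvStepA (a :: t) x = (a :: t).dropLast := by simp [pvStepA, hg]
      rw [h1]
      simp only [pvStepA, if_neg hne]
      exact hs
  · simp only [pvStepA, if_neg hg]
    rw [if_pos (by simp), List.dropLast_concat]

theorem pvFold_removePair : ∀ (xs ys s : List String), pvNoAdj s →
    pvRemovePair xs = some ys →
    List.foldl pvStepA s ys = List.foldl pvStepA s xs := by
  intro xs
  induction xs with
  | nil => intro ys s _ h; simp [pvRemovePair] at h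
  | cons a t ih =>
    intro ys s hs h
    match t, h with
    | [], h => simp [pvRemovePair] at h
    | b :: rest, h =>
      by_cases hab : a = b
      · subst hab
        simp [pvRemovePair] at h
        subst h
        simp only [List.foldl_cons]
        rw [pvStepA_double s a hs]
      · simp [pvRemovePair, hab] at h
        obtain ⟨zs, hz, rfl⟩ := h
        simp only [List.foldl_cons]
        exact ih zs (pvStepA s a) (pvStepA_noAdj s a hs) hz

theorem pvRemovePair_none_noAdj : ∀ (xs : List String), pvRemovePair xs = none → pvNoAdj xs := by
  intro xs
  induction xs with
  | nil => intro _; trivial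
  | cons a t ih =>
    intro h
    match t with
    | [] => trivial
    | b :: rest =>
      by_cases hab : a = b
      · simp [pvRemovePair, hab] at h
      · simp [pvRemovePair, hab] at h
        exact ⟨hab, ih h⟩

theorem pvFold_noAdj : ∀ (xs s : List String), pvNoAdj (s ++ xs) →
    List.foldl pvStepA s xs = s ++ xs := by
  intro xs
  induction xs with
  | nil => intro s _; simp
  | cons x rest ih =>
    intro s h
    have hne : s.getLast? ≠ some x := pvNoAdj_last_ne s x rest h
    simp only [List.foldl_cons]
    have hstep : pvStepA s x = s ++ [x] := by simp [pvStepA, hne]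
    rw [hstep]
    have : pvNoAdj ((s ++ [x]) ++ rest) := by simpa using h
    rw [ih (s ++ [x]) this]
    simp

theorem pvFold_eq_reduce : ∀ (n : Nat) (xs : List String), xs.length ≤ n →
    List.foldl pvStepA [] xs = pvReduceB xs := by
  intro n
  induction n with
  | zero =>
    intro xs hl
    have : xs = [] := List.eq_nil_of_length_eq_zero (Nat.le_zero.mp hl)
    subst this
    unfold pvReduceB
    rfl
  | succ n ih =>
    intro xs hl
    unfold pvReduceB
    split
    · next ys h =>
      have hlen := pvRemovePair_length xs ys h
      rw [← ih ys (by omega)]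
      exact (pvFold_removePair xs ys [] trivial h).symm
    · next h =>
      have := pvRemovePair_none_noAdj xs h
      simpa using pvFold_noAdj xs [] (by simpa using this)

-- ===== VERDICT (by name: the statement is the Claim_ definition above) =====
theorem delete_letter_spec : Claim_equal_delete_letter := by
  intro arr _
  unfold Spec_delete_letter delete_letter delete_letter_alt
  have hmain := pvFold_eq_reduce arr.length arr le_rfl
  split_ifs with h0
  · have : arr = [] := List.eq_nil_of_length_eq_zero h0
    subst this
    rw [← hmain]
    rfl
  · rw [hmain]
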